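-- pv_equiv track=rewrite | github.com/jackfrost168/adventofcode | 2021/day3.py | count_0_1
-- ===== SOURCE A (Python) =====
-- def count_0_1(binary_numbers):
--     count_0, count_1 = 0, 0
--     for bit in binary_numbers:
--         if bit == '1':
--             count_1 += 1
--         elif bit == '0':
--             count_0 += 1
--     return count_0, count_1
-- ===== SOURCE B (Python) =====
-- def count_0_1(binary_numbers):
--     bits = list(binary_numbers)
--     return bits.count('0'), bits.count('1')
-- ===== Notes on version B (the rewrite author's own statement) =====
-- stated objective: idiomatic
-- what changed: Removed the explicit if/elif counting loop entirely: B materialises the iterable once and answers with two library list.count scans instead of maintaining two counters branch-by-branch.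
import Mathlib
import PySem

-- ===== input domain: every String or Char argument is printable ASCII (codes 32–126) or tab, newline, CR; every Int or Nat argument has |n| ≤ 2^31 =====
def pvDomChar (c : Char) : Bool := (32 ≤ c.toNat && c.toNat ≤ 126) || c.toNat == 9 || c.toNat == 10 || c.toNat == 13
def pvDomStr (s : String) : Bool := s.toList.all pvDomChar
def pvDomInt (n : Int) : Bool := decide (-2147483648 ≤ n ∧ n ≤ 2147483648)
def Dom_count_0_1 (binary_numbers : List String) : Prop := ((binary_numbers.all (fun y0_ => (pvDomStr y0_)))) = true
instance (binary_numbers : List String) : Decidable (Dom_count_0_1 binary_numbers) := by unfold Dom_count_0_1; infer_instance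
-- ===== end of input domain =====

-- B drops the if/elif counter loop: it materialises the input once and uses two library list.count scans; same result, same cost.


-- ===== PORT A =====
def count_0_1 (binary_numbers : List String) : Int × Int :=
  binary_numbers.foldl
    (fun (acc : Int × Int) bit =>
      if bit == "1" then (acc.1, acc.2 + 1)
      else if bit == "0" then (acc.1 + 1, acc.2)
      else acc)
    (0, 0)

-- ===== PORT B =====
def count_0_1_alt (binary_numbers : List String) : Int × Int :=
  let bits := binary_numbers
  ((PySem.List.count bits "0" : Int), (PySem.List.count bits "1" : Int))

-- ===== PRECONDITION & SPEC =====
def Spec_count_0_1 (binary_numbers : List String) (out : Int × Int) : Prop := out = count_0_1_alt binary_numbers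
instance (binary_numbers : List String) (out : Int × Int) : Decidable (Spec_count_0_1 binary_numbers out) := by unfold Spec_count_0_1; infer_instance

-- ===== CLAIM (what is proved, stated in full; the proofs are below) =====
def Claim_equal_count_0_1 : Prop := ∀ (binary_numbers : List String), Dom_count_0_1 binary_numbers → Spec_count_0_1 binary_numbers (count_0_1 binary_numbers)

-- ===== LEMMAS AND PROOFS =====
lemma countA_acc (l : List String) (a b : Int) :
    l.foldl
      (fun (acc : Int × Int) bit =>
        if bit == "1" then (acc.1, acc.2 + 1)
        else if bit == "0" then (acc.1 + 1, acc.2)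
        else acc)
      (a, b) = (a + l.count "0", b + l.count "1") := by
  induction l generalizing a b with
  | nil => simp
  | cons x xs ih =>
    simp only [List.foldl_cons]
    by_cases h1 : x = "1"
    · subst h1
      rw [if_pos (by simp), ih]
      simp [List.count_cons, Prod.ext_iff]
      push_cast
      ring
    · by_cases h0 : x = "0"
      · subst h0
        rw [if_neg (by simp), if_pos (by simp), ih]
        simp [List.count_cons, Prod.ext_iff]
        push_cast
        ring
      · rw [if_neg (by simp [h1]), if_neg (by simp [h0]), ih]
        simp [List.count_cons, Ne.symm h1, Ne.symm h0]
        exact ⟨h0, h1⟩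

-- ===== VERDICT (by name: the statement is the Claim_ definition above) =====
theorem count_0_1_spec : Claim_equal_count_0_1 := by
  intro bs _
  unfold Spec_count_0_1 count_0_1 count_0_1_alt
  rw [countA_acc]
  simp [PySem.List.count_eq]
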